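-- pv_equiv track=rewrite | github.com/junyang168/smart-answer | backend/sermon_to_video/core/assembly.py | _find_highlight_spans
-- ===== SOURCE A (Python) =====
-- def _parse_highlight_term_spec(term_spec: str) -> tuple[str, int | None]:
--     raw = str(term_spec or "").strip()
--     if not raw.endswith("]"):
--         return raw, None
--
--     open_idx = raw.rfind("[")
--     if open_idx <= 0:
--         return raw, None
--
--     occurrence_raw = raw[open_idx + 1 : -1].strip()
--     if not occurrence_raw:
--         return raw, None
--
--     try:
--         occurrence = int(occurrence_raw)
--     except ValueError:
--         return raw, None
--
--     if occurrence == 0: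
--         return raw, None
--     return raw[:open_idx], occurrence
--
-- def _find_all_term_occurrences(line_text: str, term_text: str) -> list[tuple[int, int]]:
--     if not line_text or not term_text:
--         return []
--
--     matches = []
--     start = 0
--     while True:
--         idx = line_text.find(term_text, start)
--         if idx < 0:
--             break
--         matches.append((idx, idx + len(term_text)))
--         start = idx + len(term_text)
--     return matches
--
-- def _find_highlight_spans(line_text: str, highlight_terms: list[str]) -> list[tuple[int, int]]:
--     if not line_text:
--         return []
--
--     matches = []
--     for term_spec in highlight_terms:
--         term_text, occurrence = _parse_highlight_term_spec(term_spec)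
--         if not term_text:
--             continue
--         term_matches = _find_all_term_occurrences(line_text, term_text)
--         if not term_matches:
--             continue
--
--         if occurrence is None:
--             matches.extend(term_matches)
--         elif occurrence > 0:
--             if occurrence <= len(term_matches):
--                 matches.append(term_matches[occurrence - 1])
--         elif occurrence == -1:
--             matches.append(term_matches[-1])
--
--     if not matches:
--         return []
--
--     matches.sort()
--     merged = []
--     for start, end in matches:
--         if not merged or start > merged[-1][1]:
--             merged.append([start, end])
--         else:
--             merged[-1][1] = max(merged[-1][1], end)
--     return [(start, end) for start, end in merged]
-- ===== SOURCE B (Python) =====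
-- def _parse_highlight_term_spec(term_spec: str) -> tuple[str, int | None]:
--     raw = str(term_spec or "").strip()
--     open_idx = raw.rfind("[")
--     if raw.endswith("]") and open_idx > 0:
--         try:
--             occurrence = int(raw[open_idx + 1 : -1].strip())
--         except ValueError:
--             occurrence = 0
--         if occurrence != 0:
--             return raw[:open_idx], occurrence
--     return raw, None
--
--
-- def _term_occurrences(line_text: str, term_text: str, start: int = 0) -> list[tuple[int, int]]:
--     idx = line_text.find(term_text, start)
--     if idx < 0:
--         return []
--     return [(idx, idx + len(term_text))] + _term_occurrences(line_text, term_text, idx + len(term_text))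
--
--
-- def _selected_spans(line_text: str, term_spec: str) -> list[tuple[int, int]]:
--     term_text, occurrence = _parse_highlight_term_spec(term_spec)
--     if not term_text:
--         return []
--     occs = _term_occurrences(line_text, term_text, 0)
--     if occurrence is None:
--         return occs
--     if occurrence > 0:
--         return occs[occurrence - 1 : occurrence]
--     if occurrence == -1:
--         return occs[-1:]
--     return []
--
--
-- def _find_highlight_spans(line_text: str, highlight_terms: list[str]) -> list[tuple[int, int]]:
--     n = len(line_text)
--     if n == 0:
--         return []
--     spans = [sp for spec in highlight_terms for sp in _selected_spans(line_text, spec)]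
--     covered = [any(s <= i < e for (s, e) in spans) for i in range(n)]
--     result = []
--     run_start = None
--     for i, flag in enumerate(covered):
--         if flag:
--             if run_start is None:
--                 run_start = i
--         elif run_start is not None:
--             result.append((run_start, i))
--             run_start = None
--     if run_start is not None:
--         result.append((run_start, n))
--     return result
-- ===== Notes on version B (the rewrite author's own statement) =====
-- stated objective: alternative
-- what changed: B keeps the term parsing/occurrence selection (restructured: merged-condition parse, recursive finder, slice-based selection, one flatMap comprehension) but replaces A's sort-then-merge of intervals by painting a boolean coverage array over the line and emitting maximal contiguous True runs in one left-to-right scan.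
import Mathlib
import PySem

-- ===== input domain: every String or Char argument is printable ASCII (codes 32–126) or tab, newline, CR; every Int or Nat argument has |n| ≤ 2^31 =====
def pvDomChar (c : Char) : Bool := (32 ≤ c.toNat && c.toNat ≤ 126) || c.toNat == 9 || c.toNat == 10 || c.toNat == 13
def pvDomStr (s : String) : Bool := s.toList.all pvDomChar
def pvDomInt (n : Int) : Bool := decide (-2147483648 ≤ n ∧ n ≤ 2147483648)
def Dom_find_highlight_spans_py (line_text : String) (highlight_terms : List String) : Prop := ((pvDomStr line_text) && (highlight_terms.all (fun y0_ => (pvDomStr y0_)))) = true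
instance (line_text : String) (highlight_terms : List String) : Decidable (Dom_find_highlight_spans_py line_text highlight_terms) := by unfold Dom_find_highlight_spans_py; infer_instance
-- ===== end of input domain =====

-- B replaces A's sort-then-merge of highlight spans by a boolean coverage scan over the line
-- (same parsing/occurrence selection, restructured); alternative algorithm, same results.


-- ===== PORT A =====

-- A's _parse_highlight_term_spec, early-return chain kept
def parseSpecA (term_spec : String) : String × Option Int :=
  let raw := PySem.Str.strip term_spec          -- str(term_spec or "").strip(); (s or "") = s on str
  if ¬ (PySem.Str.endswith raw "]") then (raw, none)
  else
    let open_idx := PySem.Str.rfind raw "["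
    if open_idx ≤ 0 then (raw, none)
    else
      let occurrence_raw := PySem.Str.strip (PySem.Str.slice raw (some (open_idx + 1)) (some (-1)))
      if occurrence_raw = "" then (raw, none)
      else
        match PySem.Int.ofStr? occurrence_raw with      -- try: int(...) except ValueError
        | none => (raw, none)
        | some occurrence =>
          if occurrence = 0 then (raw, none)
          else (PySem.Str.slice raw none (some open_idx), some occurrence)

-- A's while-loop in _find_all_term_occurrences, with its accumulator; fuel bounds the
-- number of loop iterations (start strictly grows, so line-length+1 iterations suffice)
def findAllGoA (line_text term_text : String) (start : Int) (acc : List (Int × Int)) : Nat → List (Int × Int)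
  | 0 => acc
  | fuel + 1 =>
    let idx := PySem.Str.findFrom line_text term_text start
    if idx < 0 then acc
    else findAllGoA line_text term_text (idx + PySem.Str.len term_text)
           (acc ++ [(idx, idx + PySem.Str.len term_text)]) fuel

def findAllA (line_text term_text : String) : List (Int × Int) :=
  if line_text = "" ∨ term_text = "" then []
  else findAllGoA line_text term_text 0 [] ((PySem.Str.len line_text).toNat + 1)

-- body of A's 'for term_spec in highlight_terms' loop over the matches accumulator
def collectStepA (line_text : String) (acc : List (Int × Int)) (term_spec : String) : List (Int × Int) :=
  let p := parseSpecA term_spec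
  if p.1 = "" then acc
  else
    let term_matches := findAllA line_text p.1
    if term_matches = [] then acc
    else
      match p.2 with
      | none => acc ++ term_matches
      | some occurrence =>
        if occurrence > 0 then
          if occurrence ≤ (term_matches.length : Int) then
            match PySem.List.pyGet? term_matches (occurrence - 1) with   -- in range: guarded
            | some q => acc ++ [q]
            | none => acc
          else acc
        else if occurrence = -1 then
          match PySem.List.pyGet? term_matches (-1) with                 -- nonempty: guarded
          | some q => acc ++ [q]
          | none => acc
        else acc

-- body of A's merge loop ('if not merged or start > merged[-1][1]')
def mergeStepA (mg : List (Int × Int)) (p : Int × Int) : List (Int × Int) :=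
  match mg.getLast? with
  | none => mg ++ [p]
  | some q => if p.1 > q.2 then mg ++ [p] else mg.dropLast ++ [(q.1, max q.2 p.2)]

def find_highlight_spans_py (line_text : String) (highlight_terms : List String) : List (Int × Int) :=
  if line_text = "" then []
  else
    let ms0 := highlight_terms.foldl (collectStepA line_text) []
    if ms0 = [] then []
    else
      let ms := PySem.List.sorted ms0 (fun p => toLex p) false       -- matches.sort(): tuples compare lexicographically
      let merged := ms.foldl mergeStepA []
      merged.map (fun p => (p.1, p.2))

-- ===== PORT B =====

-- B's parse: one merged condition instead of the early-return chain
def parseSpecB (term_spec : String) : String × Option Int :=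
  let raw := PySem.Str.strip term_spec
  let open_idx := PySem.Str.rfind raw "["
  if PySem.Str.endswith raw "]" ∧ open_idx > 0 then
    match PySem.Int.ofStr? (PySem.Str.strip (PySem.Str.slice raw (some (open_idx + 1)) (some (-1)))) with
    | some occurrence =>
      if occurrence ≠ 0 then (PySem.Str.slice raw none (some open_idx), some occurrence)
      else (raw, none)
    | none => (raw, none)
  else (raw, none)

-- B's recursive _term_occurrences; same fuel bound as A's loop
def occGoB (line_text term_text : String) (start : Int) : Nat → List (Int × Int)
  | 0 => []
  | fuel + 1 =>
    let idx := PySem.Str.findFrom line_text term_text start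
    if idx < 0 then []
    else (idx, idx + PySem.Str.len term_text) :: occGoB line_text term_text (idx + PySem.Str.len term_text) fuel

def selectedSpansB (line_text term_spec : String) : List (Int × Int) :=
  let p := parseSpecB term_spec
  if p.1 = "" then []
  else
    let occs := occGoB line_text p.1 0 ((PySem.Str.len line_text).toNat + 1)
    match p.2 with
    | none => occs
    | some occurrence =>
      if occurrence > 0 then PySem.List.slice occs (some (occurrence - 1)) (some occurrence)
      else if occurrence = -1 then PySem.List.slice occs (some (-1)) none
      else []

-- body of B's run-emitting scan over the enumerated coverage bitmap
def scanStepB (st : Option Int × List (Int × Int)) (q : Int × Bool) : Option Int × List (Int × Int) :=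
  if q.2 then (if st.1 = none then (some q.1, st.2) else st)
  else
    match st.1 with
    | some a => (none, st.2 ++ [(a, q.1)])
    | none => st

def find_highlight_spans_py_alt (line_text : String) (highlight_terms : List String) : List (Int × Int) :=
  let n := PySem.Str.len line_text
  if n = 0 then []
  else
    let spans := highlight_terms.flatMap (fun spec => selectedSpansB line_text spec)
    let covered := (PySem.List.pyRange 0 n).map
      (fun i => spans.any (fun p => decide (p.1 ≤ i) && decide (i < p.2)))
    let r := (PySem.List.enumerate covered).foldl scanStepB ((none : Option Int), ([] : List (Int × Int)))
    match r.1 with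
    | some a => r.2 ++ [(a, n)]
    | none => r.2

-- ===== PRECONDITION & SPEC =====
def Spec_find_highlight_spans_py (line_text : String) (highlight_terms : List String) (out : List (Int × Int)) : Prop := out = find_highlight_spans_py_alt line_text highlight_terms
instance (line_text : String) (highlight_terms : List String) (out : List (Int × Int)) : Decidable (Spec_find_highlight_spans_py line_text highlight_terms out) := by unfold Spec_find_highlight_spans_py; infer_instance

-- ===== CLAIM (what is proved, stated in full; the proofs are below) =====
def Claim_equal_find_highlight_spans_py : Prop := ∀ (line_text : String) (highlight_terms : List String), Dom_find_highlight_spans_py line_text highlight_terms → Spec_find_highlight_spans_py line_text highlight_terms (find_highlight_spans_py line_text highlight_terms)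

-- ===== LEMMAS AND PROOFS =====

-- i lies in one of the (end-exclusive) spans of out
def coveredBy (out : List (Int × Int)) (i : Int) : Prop := ∃ p ∈ out, p.1 ≤ i ∧ i < p.2

def SpanBounds (n : Int) (p : Int × Int) : Prop := 0 ≤ p.1 ∧ p.1 < p.2 ∧ p.2 ≤ n

-- "out is the list of maximal runs of f on [0,n)": sorted, separated, in-bounds, covering exactly f
def IsRuns (n : Int) (f : Int → Bool) (out : List (Int × Int)) : Prop :=
  out.Pairwise (fun p q => p.2 < q.1) ∧ (∀ p ∈ out, SpanBounds n p) ∧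
  (∀ i : Int, 0 ≤ i → i < n → (f i = true ↔ coveredBy out i))

theorem coveredBy_append (l l' : List (Int × Int)) (i : Int) :
    coveredBy (l ++ l') i ↔ coveredBy l i ∨ coveredBy l' i := by
  simp [coveredBy, List.mem_append, or_and_right, exists_or]

theorem coveredBy_single (x : Int × Int) (i : Int) : coveredBy [x] i ↔ x.1 ≤ i ∧ i < x.2 := by
  simp [coveredBy]

theorem runs_head_le (n : Int) (f : Int → Bool) (p q : Int × Int) (t1 t2 : List (Int × Int))
    (h1 : IsRuns n f (p :: t1)) (h2 : IsRuns n f (q :: t2)) : p.1 ≤ q.1 := by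
  obtain ⟨hpw1, hbd1, hcov1⟩ := h1
  obtain ⟨-, hbd2, hcov2⟩ := h2
  obtain ⟨hq0, hq12, hq2n⟩ := hbd2 q (by simp)
  have hf : f q.1 = true := (hcov2 q.1 hq0 (by omega)).mpr ⟨q, by simp, le_refl _, hq12⟩
  obtain ⟨r, hr, hri, -⟩ := (hcov1 q.1 hq0 (by omega)).mp hf
  rcases List.mem_cons.mp hr with rfl | hrt
  · exact hri
  · have hlt : p.2 < r.1 := (List.pairwise_cons.mp hpw1).1 r hrt
    obtain ⟨-, hp12, -⟩ := hbd1 p (by simp)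
    omega

theorem runs_head_end_le (n : Int) (f : Int → Bool) (p q : Int × Int) (t1 t2 : List (Int × Int))
    (h1 : IsRuns n f (p :: t1)) (h2 : IsRuns n f (q :: t2)) (hst : p.1 = q.1) : p.2 ≤ q.2 := by
  by_contra hcon
  obtain ⟨hpw1, hbd1, hcov1⟩ := h1
  obtain ⟨hpw2, hbd2, hcov2⟩ := h2
  obtain ⟨hq0, hq12, hq2n⟩ := hbd2 q (by simp)
  obtain ⟨hp0, hp12, hp2n⟩ := hbd1 p (by simp)
  -- the index q.2 is covered by p but by nothing in q :: t2
  have hf : f q.2 = true := (hcov1 q.2 (by omega) (by omega)).mpr ⟨p, by simp, by omega, by omega⟩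
  obtain ⟨r, hr, hri, hri2⟩ := (hcov2 q.2 (by omega) (by omega)).mp hf
  rcases List.mem_cons.mp hr with rfl | hrt
  · omega
  · have hlt : q.2 < r.1 := (List.pairwise_cons.mp hpw2).1 r hrt
    omega

theorem runs_tail (n : Int) (f : Int → Bool) (p : Int × Int) (t : List (Int × Int))
    (h : IsRuns n f (p :: t)) : IsRuns n (fun i => f i && decide (p.2 ≤ i)) t := by
  obtain ⟨hpw, hbd, hcov⟩ := h
  refine ⟨(List.pairwise_cons.mp hpw).2, fun r hr => hbd r (by simp [hr]), ?_⟩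
  intro i hi0 hin
  simp only [Bool.and_eq_true, decide_eq_true_eq]
  constructor
  · rintro ⟨hf, hge⟩
    obtain ⟨r, hr, hri, hri2⟩ := (hcov i hi0 hin).mp hf
    rcases List.mem_cons.mp hr with rfl | hrt
    · omega
    · exact ⟨r, hrt, hri, hri2⟩
  · rintro ⟨r, hrt, hri, hri2⟩
    have hf : f i = true := (hcov i hi0 hin).mpr ⟨r, by simp [hrt], hri, hri2⟩
    have hlt : p.2 < r.1 := (List.pairwise_cons.mp hpw).1 r hrt
    exact ⟨hf, by omega⟩

theorem runs_unique (n : Int) :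
    ∀ (out1 : List (Int × Int)) (f : Int → Bool) (out2 : List (Int × Int)),
      IsRuns n f out1 → IsRuns n f out2 → out1 = out2 := by
  intro out1
  induction out1 with
  | nil =>
    intro f out2 h1 h2
    cases out2 with
    | nil => rfl
    | cons q t2 =>
      exfalso
      obtain ⟨-, hbd2, hcov2⟩ := h2
      obtain ⟨-, -, hcov1⟩ := h1
      obtain ⟨hq0, hq12, hq2n⟩ := hbd2 q (by simp)
      have hf : f q.1 = true := (hcov2 q.1 hq0 (by omega)).mpr ⟨q, by simp, le_refl _, hq12⟩
      obtain ⟨r, hr, -⟩ := (hcov1 q.1 hq0 (by omega)).mp hf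
      simp at hr
  | cons p t1 ih =>
    intro f out2 h1 h2
    cases out2 with
    | nil =>
      exfalso
      obtain ⟨-, hbd1, hcov1⟩ := h1
      obtain ⟨-, -, hcov2⟩ := h2
      obtain ⟨hp0, hp12, hp2n⟩ := hbd1 p (by simp)
      have hf : f p.1 = true := (hcov1 p.1 hp0 (by omega)).mpr ⟨p, by simp, le_refl _, hp12⟩
      obtain ⟨r, hr, -⟩ := (hcov2 p.1 hp0 (by omega)).mp hf
      simp at hr
    | cons q t2 =>
      have hst : p.1 = q.1 :=
        le_antisymm (runs_head_le n f p q t1 t2 h1 h2) (runs_head_le n f q p t2 t1 h2 h1)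
      have hen : p.2 = q.2 :=
        le_antisymm (runs_head_end_le n f p q t1 t2 h1 h2 hst)
          (runs_head_end_le n f q p t2 t1 h2 h1 hst.symm)
      have hpq : p = q := Prod.ext hst hen
      subst hpq
      have ht : t1 = t2 :=
        ih (fun i => f i && decide (p.2 ≤ i)) t2 (runs_tail n f p t1 h1) (runs_tail n f p t2 h2)
      rw [ht]

-- ------- B side: the scan produces IsRuns -------

def flushSt (st : Option Int × List (Int × Int)) (m : Int) : List (Int × Int) :=
  st.2 ++ (match st.1 with | some a => [(a, m)] | none => [])

def ScanInv (m : Int) (f : Int → Bool) (st : Option Int × List (Int × Int)) : Prop :=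
  (flushSt st m).Pairwise (fun p q => p.2 < q.1) ∧
  (∀ p ∈ flushSt st m, SpanBounds m p) ∧
  (∀ i : Int, 0 ≤ i → i < m → (f i = true ↔ coveredBy (flushSt st m) i)) ∧
  (st.1 = none → ∀ p ∈ st.2, p.2 < m)

theorem scan_step_inv (f : Int → Bool) (m : Int) (hm : 0 ≤ m) (st : Option Int × List (Int × Int))
    (h : ScanInv m f st) : ScanInv (m + 1) f (scanStepB st (m, f m)) := by
  obtain ⟨o, acc⟩ := st
  obtain ⟨hpw, hbd, hcov, hnone⟩ := h
  by_cases hf : f m = true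
  · cases o with
    | none =>
      -- open a new run at m
      have hends : ∀ p ∈ acc, p.2 < m := hnone rfl
      simp only [flushSt, List.append_nil] at hpw hbd hcov
      have hst : scanStepB (none, acc) (m, f m) = (some m, acc) := by simp [scanStepB, hf]
      rw [hst]
      refine ⟨?_, ?_, ?_, by simp⟩
      · simp only [flushSt]
        rw [List.pairwise_append]
        exact ⟨hpw, List.pairwise_singleton _ _,
          fun p hp q hq => by simp at hq; subst hq; exact hends p hp⟩
      · simp only [flushSt]
        intro p hp
        rcases List.mem_append.mp hp with hp | hp
        · obtain ⟨h1, h2, h3⟩ := hbd p hp; exact ⟨h1, h2, by omega⟩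
        · simp at hp; subst hp; exact ⟨hm, by omega, le_refl _⟩
      · simp only [flushSt]
        intro i hi0 hin
        rw [coveredBy_append, coveredBy_single]
        rcases lt_or_ge i m with him | him
        · rw [hcov i hi0 him]
          constructor
          · exact Or.inl
          · rintro (h | ⟨h1, h2⟩)
            · exact h
            · omega
        · have : i = m := by omega
          subst this
          simp [hf]
    | some a =>
      -- extend the open run
      simp only [flushSt] at hpw hbd hcov
      have hst : scanStepB (some a, acc) (m, f m) = (some a, acc) := by simp [scanStepB, hf]
      rw [hst]
      rw [List.pairwise_append] at hpw
      obtain ⟨hpw1, -, hcross⟩ := hpw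
      have hab : SpanBounds m (a, m) := hbd (a, m) (by simp)
      refine ⟨?_, ?_, ?_, by simp⟩
      · simp only [flushSt]
        rw [List.pairwise_append]
        exact ⟨hpw1, List.pairwise_singleton _ _,
          fun p hp q hq => by simp at hq; subst hq; simpa using hcross p hp (a, m) (by simp)⟩
      · simp only [flushSt]
        intro p hp
        rcases List.mem_append.mp hp with hp | hp
        · obtain ⟨h1, h2, h3⟩ := hbd p (List.mem_append.mpr (Or.inl hp)); exact ⟨h1, h2, by omega⟩
        · simp at hp; subst hp
          exact ⟨hab.1, by have := hab.2.1; omega, le_refl _⟩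
      · simp only [flushSt]
        intro i hi0 hin
        rw [coveredBy_append, coveredBy_single]
        rcases lt_or_ge i m with him | him
        · rw [hcov i hi0 him, coveredBy_append, coveredBy_single]
          constructor
          · rintro (h | ⟨h1, h2⟩)
            · exact Or.inl h
            · exact Or.inr ⟨h1, by omega⟩
          · rintro (h | ⟨h1, h2⟩)
            · exact Or.inl h
            · exact Or.inr ⟨h1, by omega⟩
        · have : i = m := by omega
          subst this
          simp only [hf, true_iff]
          exact Or.inr ⟨by have := hab.2.1; omega, by omega⟩
  · replace hf : f m = false := by simpa using hf
    cases o with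
    | none =>
      -- nothing open, nothing to do
      have hends : ∀ p ∈ acc, p.2 < m := hnone rfl
      simp only [flushSt, List.append_nil] at hpw hbd hcov
      have hst : scanStepB (none, acc) (m, f m) = (none, acc) := by simp [scanStepB, hf]
      rw [hst]
      refine ⟨?_, ?_, ?_, fun _ p hp => by have := hends p hp; omega⟩
      · simpa only [flushSt, List.append_nil] using hpw
      · simp only [flushSt, List.append_nil]
        intro p hp
        obtain ⟨h1, h2, h3⟩ := hbd p hp; exact ⟨h1, h2, by omega⟩
      · simp only [flushSt, List.append_nil]
        intro i hi0 hin
        rcases lt_or_ge i m with him | him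
        · exact hcov i hi0 him
        · have : i = m := by omega
          subst this
          simp only [hf, Bool.false_eq_true, false_iff]
          rintro ⟨p, hp, h1, h2⟩
          have := hends p hp
          omega
    | some a =>
      -- close the open run at m
      simp only [flushSt] at hpw hbd hcov
      have hst : scanStepB (some a, acc) (m, f m) = (none, acc ++ [(a, m)]) := by
        simp [scanStepB, hf]
      rw [hst]
      refine ⟨?_, ?_, ?_, ?_⟩
      · simpa only [flushSt, List.append_nil] using hpw
      · simp only [flushSt, List.append_nil]
        intro p hp
        obtain ⟨h1, h2, h3⟩ := hbd p hp; exact ⟨h1, h2, by omega⟩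
      · simp only [flushSt, List.append_nil]
        intro i hi0 hin
        rcases lt_or_ge i m with him | him
        · exact hcov i hi0 him
        · have : i = m := by omega
          subst this
          simp only [hf, Bool.false_eq_true, false_iff]
          rintro ⟨p, hp, h1, h2⟩
          obtain ⟨-, -, h3⟩ := hbd p hp
          omega
      · intro _ p hp
        obtain ⟨-, -, h3⟩ := hbd p hp
        omega

theorem scan_inv (f : Int → Bool) (m : Nat) :
    ScanInv (m : Int) f (((PySem.List.pyRange 0 (m : Int)).map (fun j => (j, f j))).foldl scanStepB (none, [])) := by
  induction m with
  | zero =>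
    rw [show ((0 : Nat) : Int) = 0 from rfl, PySem.List.pyRange_one_eq_nil (le_refl 0)]
    exact ⟨by simp [flushSt], by simp [flushSt], fun i h1 h2 => absurd (lt_of_le_of_lt h1 h2) (by simp), by simp⟩
  | succ m ih =>
    have hc : ((m + 1 : Nat) : Int) = (m : Int) + 1 := by push_cast; ring
    rw [hc, PySem.List.pyRange_one_succ_right (by positivity), List.map_append, List.foldl_append]
    exact scan_step_inv f (m : Int) (by positivity) _ ih

theorem scan_isruns (f : Int → Bool) (m : Nat) :
    IsRuns (m : Int) f (flushSt (((PySem.List.pyRange 0 (m : Int)).map (fun j => (j, f j))).foldl scanStepB (none, [])) (m : Int)) := by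
  obtain ⟨h1, h2, h3, -⟩ := scan_inv f m
  exact ⟨h1, h2, h3⟩

-- ------- A side: sort-then-merge produces IsRuns -------

def MergeInv (n : Int) (pre mg : List (Int × Int)) : Prop :=
  mg.Pairwise (fun p q => p.2 < q.1) ∧
  (∀ p ∈ mg, SpanBounds n p) ∧
  (∀ q ∈ pre, SpanBounds n q) ∧
  (∀ i : Int, coveredBy mg i ↔ coveredBy pre i) ∧
  (∀ q ∈ pre, ∀ b, mg.getLast? = some b → q.2 ≤ b.2) ∧
  (∀ p ∈ mg, ∃ q ∈ pre, p.1 = q.1)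

theorem mergeStepA_none (mg : List (Int × Int)) (r : Int × Int) (h : mg.getLast? = none) :
    mergeStepA mg r = mg ++ [r] := by
  simp [mergeStepA, h]

theorem mergeStepA_some (mg : List (Int × Int)) (r q : Int × Int) (h : mg.getLast? = some q) :
    mergeStepA mg r = if r.1 > q.2 then mg ++ [r] else mg.dropLast ++ [(q.1, max q.2 r.2)] := by
  simp [mergeStepA, h]

theorem merge_step_inv (n : Int) (pre mg : List (Int × Int)) (r : Int × Int)
    (hr : SpanBounds n r) (hpre_r : ∀ q ∈ pre, q.1 ≤ r.1) (h : MergeInv n pre mg) :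
    MergeInv n (pre ++ [r]) (mergeStepA mg r) := by
  obtain ⟨hpw, hbmg, hbpre, hcov, hlast, hstart⟩ := h
  cases hgl : mg.getLast? with
  | none =>
    rw [mergeStepA_none mg r hgl]
    have hmgnil : mg = [] := List.getLast?_eq_none_iff.mp hgl
    subst hmgnil
    have hpre_empty : ∀ q ∈ pre, False := by
      intro q hq
      obtain ⟨-, hq12, -⟩ := hbpre q hq
      obtain ⟨x, hx, -⟩ := (hcov q.1).mpr ⟨q, hq, le_refl _, hq12⟩
      simp at hx
    refine ⟨by simp, ?_, ?_, ?_, ?_, ?_⟩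
    · intro p hp; rcases List.mem_singleton.mp hp with rfl; exact hr
    · intro q hq
      rcases List.mem_append.mp hq with hq | hq
      · exact absurd (hpre_empty q hq) not_false
      · rcases List.mem_singleton.mp hq with rfl; exact hr
    · intro i
      simp only [List.nil_append, coveredBy_append, coveredBy_single]
      constructor
      · intro hc; exact Or.inr hc
      · rintro (⟨q, hq, -⟩ | hc)
        · exact absurd (hpre_empty q hq) not_false
        · exact hc
    · intro q hq b hb
      simp only [List.nil_append, List.getLast?_singleton, Option.some.injEq] at hb
      subst hb
      rcases List.mem_append.mp hq with hq | hq
      · exact absurd (hpre_empty q hq) not_false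
      · rcases List.mem_singleton.mp hq with rfl; exact le_refl _
    · intro p hp
      rcases List.mem_singleton.mp hp with rfl
      exact ⟨p, by simp, rfl⟩
  | some lastq =>
    rw [mergeStepA_some mg r lastq hgl]
    have hmg_eq : mg = mg.dropLast ++ [lastq] := (List.dropLast_append_getLast? lastq hgl).symm
    have hlast_mem : lastq ∈ mg := by rw [hmg_eq]; simp
    have hbl : SpanBounds n lastq := hbmg lastq hlast_mem
    have hdl : List.Pairwise (fun p q => p.2 < q.1) mg.dropLast ∧
        ∀ p ∈ mg.dropLast, p.2 < lastq.1 := by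
      rw [hmg_eq, List.pairwise_append] at hpw
      exact ⟨hpw.1, fun p hp => by simpa using hpw.2.2 p hp lastq (by simp)⟩
    have hends : ∀ p ∈ mg, p.2 ≤ lastq.2 := by
      intro p hp
      rw [hmg_eq] at hp
      rcases List.mem_append.mp hp with hp | hp
      · have h1 := hdl.2 p hp
        have := hbl.2.1
        omega
      · rcases List.mem_singleton.mp hp with rfl; exact le_refl _
    by_cases hgt : r.1 > lastq.2
    · -- start a new merged interval
      rw [if_pos hgt]
      refine ⟨?_, ?_, ?_, ?_, ?_, ?_⟩
      · rw [List.pairwise_append]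
        refine ⟨hpw, List.pairwise_singleton _ _, fun p hp q hq => ?_⟩
        rcases List.mem_singleton.mp hq with rfl
        have := hends p hp
        omega
      · intro p hp
        rcases List.mem_append.mp hp with hp | hp
        · exact hbmg p hp
        · rcases List.mem_singleton.mp hp with rfl; exact hr
      · intro q hq
        rcases List.mem_append.mp hq with hq | hq
        · exact hbpre q hq
        · rcases List.mem_singleton.mp hq with rfl; exact hr
      · intro i
        rw [coveredBy_append, coveredBy_append, coveredBy_single, hcov i]
      · intro q hq b hb
        rw [List.getLast?_concat] at hb
        injection hb with hb
        subst hb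
        rcases List.mem_append.mp hq with hq | hq
        · have := hlast q hq lastq hgl
          have := hr.2.1
          omega
        · rcases List.mem_singleton.mp hq with rfl; exact le_refl _
      · intro p hp
        rcases List.mem_append.mp hp with hp | hp
        · obtain ⟨q, hq, he⟩ := hstart p hp
          exact ⟨q, List.mem_append.mpr (Or.inl hq), he⟩
        · rcases List.mem_singleton.mp hp with rfl
          exact ⟨p, by simp, rfl⟩
    · -- absorb r into the last merged interval
      rw [if_neg hgt]
      have ha_le : lastq.1 ≤ r.1 := by
        obtain ⟨q, hq, he⟩ := hstart lastq hlast_mem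
        rw [he]
        exact hpre_r q hq
      refine ⟨?_, ?_, ?_, ?_, ?_, ?_⟩
      · rw [List.pairwise_append]
        refine ⟨hdl.1, List.pairwise_singleton _ _, fun p hp q hq => ?_⟩
        rcases List.mem_singleton.mp hq with rfl
        exact hdl.2 p hp
      · intro p hp
        rcases List.mem_append.mp hp with hp | hp
        · exact hbmg p (by rw [hmg_eq]; exact List.mem_append.mpr (Or.inl hp))
        · rcases List.mem_singleton.mp hp with rfl
          refine ⟨hbl.1, by have := hbl.2.1; simp; omega, ?_⟩
          simp only [max_le_iff]
          exact ⟨hbl.2.2, hr.2.2⟩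
      · intro q hq
        rcases List.mem_append.mp hq with hq | hq
        · exact hbpre q hq
        · rcases List.mem_singleton.mp hq with rfl; exact hr
      · intro i
        rw [coveredBy_append, coveredBy_single]
        have hmgcov : coveredBy mg i ↔ (coveredBy mg.dropLast i ∨ (lastq.1 ≤ i ∧ i < lastq.2)) := by
          conv_lhs => rw [hmg_eq]
          rw [coveredBy_append, coveredBy_single]
        rw [coveredBy_append, coveredBy_single, ← hcov i, hmgcov]
        constructor
        · rintro (h | ⟨h1, h2⟩)
          · exact Or.inl (Or.inl h)
          · rcases lt_or_ge i lastq.2 with hi | hi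
            · exact Or.inl (Or.inr ⟨h1, hi⟩)
            · refine Or.inr ⟨by omega, ?_⟩
              rcases max_cases lastq.2 r.2 with ⟨he, -⟩ | ⟨he, -⟩ <;> omega
        · rintro ((h | ⟨h1, h2⟩) | ⟨h1, h2⟩)
          · exact Or.inl h
          · exact Or.inr ⟨h1, lt_of_lt_of_le h2 (le_max_left _ _)⟩
          · exact Or.inr ⟨by omega, lt_of_lt_of_le h2 (le_max_right _ _)⟩
      · intro q hq b hb
        rw [List.getLast?_concat] at hb
        injection hb with hb
        subst hb
        simp only
        rcases List.mem_append.mp hq with hq | hq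
        · have := hlast q hq lastq hgl
          exact le_trans this (le_max_left _ _)
        · rcases List.mem_singleton.mp hq with rfl
          exact le_max_right _ _
      · intro p hp
        rcases List.mem_append.mp hp with hp | hp
        · obtain ⟨q, hq, he⟩ := hstart p (by rw [hmg_eq]; exact List.mem_append.mpr (Or.inl hp))
          exact ⟨q, List.mem_append.mpr (Or.inl hq), he⟩
        · rcases List.mem_singleton.mp hp with rfl
          obtain ⟨q, hq, he⟩ := hstart lastq hlast_mem
          exact ⟨q, List.mem_append.mpr (Or.inl hq), he⟩

theorem merge_inv (n : Int) :
    ∀ (rest pre mg : List (Int × Int)),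
      (∀ r ∈ rest, SpanBounds n r) →
      rest.Pairwise (fun p q => p.1 ≤ q.1) →
      (∀ q ∈ pre, ∀ r ∈ rest, q.1 ≤ r.1) →
      MergeInv n pre mg →
      MergeInv n (pre ++ rest) (rest.foldl mergeStepA mg) := by
  intro rest
  induction rest with
  | nil => intro pre mg _ _ _ h; simpa using h
  | cons r rest' ih =>
    intro pre mg hbd hpw hpre h
    rw [List.foldl_cons]
    have hstep := merge_step_inv n pre mg r (hbd r (by simp))
      (fun q hq => hpre q hq r (by simp)) h
    have := ih (pre ++ [r]) (mergeStepA mg r)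
      (fun x hx => hbd x (by simp [hx]))
      ((List.pairwise_cons.mp hpw).2)
      (fun q hq x hx => by
        rcases List.mem_append.mp hq with hq | hq
        · exact hpre q hq x (by simp [hx])
        · simp at hq; subst hq
          exact (List.pairwise_cons.mp hpw).1 x hx)
      hstep
    simpa using this

-- ------- bridging the two collection phases -------

theorem parse_eq (s : String) : parseSpecA s = parseSpecB s := by
  simp only [parseSpecA, parseSpecB]
  generalize PySem.Str.strip s = raw
  generalize hoi : PySem.Str.rfind raw "[" = oi
  generalize hor : PySem.Str.strip (PySem.Str.slice raw (some (oi + 1)) (some (-1))) = occRaw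
  generalize hew : PySem.Str.endswith raw "]" = ew
  cases ew with
  | false => simp
  | true =>
    by_cases h2 : oi ≤ 0
    · simp [h2, show ¬ oi > 0 by omega]
    · simp only [not_true_eq_false, true_and, if_neg h2, if_pos (show oi > 0 by omega)]
      by_cases h3 : occRaw = ""
      · subst h3
        simp [show PySem.Int.ofStr? "" = none from by decide]
      · rw [if_neg h3]
        cases hof : PySem.Int.ofStr? occRaw with
        | none => simp
        | some occ =>
          by_cases h4 : occ = 0
          · simp [h4]
          · simp [h4]

theorem goA_eq_goB (line term : String) :
    ∀ (fuel : Nat) (start : Int) (acc : List (Int × Int)),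
      findAllGoA line term start acc fuel = acc ++ occGoB line term start fuel := by
  intro fuel
  induction fuel with
  | zero => intro start acc; simp [findAllGoA, occGoB]
  | succ fuel ih =>
    intro start acc
    simp only [findAllGoA, occGoB]
    by_cases h : PySem.Chars.findFrom line.toList term.toList start < 0
    · simp [h]
    · simp [h, ih]

theorem pyGet_nonneg_eq {α : Type} (l : List α) (i : Int) (h0 : 0 ≤ i) (h : i < (l.length : Int)) :
    PySem.List.pyGet? l i = some (l[i.toNat]'(by omega)) := by
  simp only [PySem.List.pyGet?, PySem.List.pyIdx?]
  rw [if_pos h0, if_pos (by exact_mod_cast h)]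
  simp [List.getElem?_eq_getElem (show i.toNat < l.length by omega)]

theorem pyGet_neg_one_eq {α : Type} (l : List α) (h : l ≠ []) :
    PySem.List.pyGet? l (-1) = some (l.getLast h) := by
  have hl : 0 < l.length := List.length_pos_iff.mpr h
  simp only [PySem.List.pyGet?, PySem.List.pyIdx?]
  rw [if_neg (by omega), if_pos (by omega)]
  simp only [Option.bind_some]
  rw [List.getElem?_eq_getElem (by omega)]
  congr 1
  rw [List.getLast_eq_getElem]; norm_num

theorem collect_step_eq (line : String) (hline : line ≠ "") (acc : List (Int × Int)) (spec : String) :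
    collectStepA line acc spec = acc ++ selectedSpansB line spec := by
  simp only [collectStepA, selectedSpansB, parse_eq]
  by_cases hterm : (parseSpecB spec).1 = ""
  · simp [hterm]
  · rw [if_neg hterm, if_neg hterm]
    have hfa : findAllA line (parseSpecB spec).1
        = occGoB line (parseSpecB spec).1 0 ((PySem.Str.len line).toNat + 1) := by
      unfold findAllA
      rw [if_neg (fun hc => hc.elim hline hterm), goA_eq_goB]
      simp
    rw [hfa]
    generalize occGoB line (parseSpecB spec).1 0 ((PySem.Str.len line).toNat + 1) = occs
    by_cases hocc0 : occs = []
    · subst hocc0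
      rw [if_pos rfl]
      cases hp2 : (parseSpecB spec).2 with
      | none => simp
      | some occ =>
        by_cases h5 : occ > 0
        · simp [h5, PySem.List.slice]
        · by_cases h9 : occ = -1 <;> simp [h5, h9, PySem.List.slice]
    · rw [if_neg hocc0]
      cases hp2 : (parseSpecB spec).2 with
      | none => rfl
      | some occ =>
        dsimp only
        by_cases h5 : occ > 0
        · rw [if_pos h5, if_pos h5,
            PySem.List.slice_toNat occs (by omega) (by omega),
            show occ.toNat - (occ - 1).toNat = 1 from by omega]
          by_cases h8 : occ ≤ (occs.length : Int)
          · have hk : (occ - 1).toNat < occs.length := by omega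
            rw [if_pos h8, pyGet_nonneg_eq occs (occ - 1) (by omega) (by omega),
              ← List.getElem_cons_drop (as := occs) hk]
            rfl
          · rw [if_neg h8, List.drop_eq_nil_of_le (by omega)]
            simp
        · rw [if_neg h5, if_neg h5]
          by_cases h9 : occ = -1
          · rw [if_pos h9, if_pos h9, pyGet_neg_one_eq occs hocc0,
              PySem.List.slice_from_neg_one, List.drop_length_sub_one hocc0]
          · rw [if_neg h9, if_neg h9]
            simp

theorem collect_eq (line : String) (hline : line ≠ "") :
    ∀ (hts : List String) (acc : List (Int × Int)),
      hts.foldl (collectStepA line) acc = acc ++ hts.flatMap (fun spec => selectedSpansB line spec) := by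
  intro hts
  induction hts with
  | nil => intro acc; simp
  | cons h t ih =>
    intro acc
    simp only [List.foldl_cons, List.flatMap_cons]
    rw [collect_step_eq line hline, ih, List.append_assoc]

theorem occGoB_bounds (line term : String) (ht : 0 < term.toList.length) :
    ∀ (fuel : Nat) (k : Nat), k ≤ line.toList.length →
      ∀ p ∈ occGoB line term (k : Int) fuel, SpanBounds (PySem.Str.len line) p := by
  intro fuel
  induction fuel with
  | zero => intro k _ p hp; simp [occGoB] at hp
  | succ fuel ih =>
    intro k hk p hp
    simp only [occGoB, PySem.Str.findFrom_eq] at hp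
    by_cases hlt : PySem.Chars.findFrom line.toList term.toList (k : Int) < 0
    · rw [if_pos hlt] at hp; simp at hp
    · rw [if_neg hlt] at hp
      set idx := PySem.Chars.findFrom line.toList term.toList (k : Int) with hidx
      obtain ⟨hki, hpre, -⟩ := PySem.Chars.findFrom_natCast_spec line.toList term.toList k hk (by omega)
      have hidx0 : 0 ≤ idx := by omega
      have hlen : idx.toNat + term.toList.length ≤ line.toList.length := by
        have h1 := hpre.length_le
        simp only [List.length_drop] at h1
        omega
      have hcast : idx + PySem.Str.len term = ((idx.toNat + term.toList.length : Nat) : Int) := by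
        simp only [PySem.Str.len]
        push_cast
        omega
      rcases List.mem_cons.mp hp with rfl | hmem
      · refine ⟨hidx0, ?_, ?_⟩
        · simp only [PySem.Str.len]; omega
        · simp only [PySem.Str.len]
          omega
      · rw [hcast] at hmem
        exact ih (idx.toNat + term.toList.length) (by omega) p hmem

theorem spans_bounds (line : String) (hts : List String) :
    ∀ p ∈ hts.flatMap (fun spec => selectedSpansB line spec), SpanBounds (PySem.Str.len line) p := by
  intro p hp
  rw [List.mem_flatMap] at hp
  obtain ⟨spec, -, hmem⟩ := hp
  rw [selectedSpansB] at hmem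
  by_cases hterm : (parseSpecB spec).1 = ""
  · rw [if_pos hterm] at hmem; simp at hmem
  · rw [if_neg hterm] at hmem
    have ht : 0 < (parseSpecB spec).1.toList.length := by
      rcases Nat.eq_zero_or_pos (parseSpecB spec).1.toList.length with h | h
      · exact absurd (String.toList_eq_nil_iff.mp (List.length_eq_zero_iff.mp h)) hterm
      · exact h
    have hocc := occGoB_bounds line (parseSpecB spec).1 ht ((PySem.Str.len line).toNat + 1) 0 (by omega)
    simp only [Nat.cast_zero] at hocc
    rcases hp2 : (parseSpecB spec).2 with - | occ <;> rw [hp2] at hmem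
    · exact hocc p hmem
    · dsimp only at hmem
      split_ifs at hmem with h5 h9
      · exact hocc p (PySem.List.mem_of_mem_slice _ _ _ hmem)
      · exact hocc p (PySem.List.mem_of_mem_slice _ _ _ hmem)
      · simp at hmem

-- ------- main equality -------

theorem coveredBy_perm (l l' : List (Int × Int)) (h : l.Perm l') (i : Int) :
    coveredBy l i ↔ coveredBy l' i := by
  unfold coveredBy
  constructor
  · rintro ⟨p, hp, h1, h2⟩; exact ⟨p, h.mem_iff.mp hp, h1, h2⟩
  · rintro ⟨p, hp, h1, h2⟩; exact ⟨p, h.mem_iff.mpr hp, h1, h2⟩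

theorem main_eq (line_text : String) (highlight_terms : List String) :
    find_highlight_spans_py line_text highlight_terms = find_highlight_spans_py_alt line_text highlight_terms := by
  by_cases hline : line_text = ""
  · subst hline; rfl
  · have hn0 : line_text.toList ≠ [] := fun h => hline (String.toList_eq_nil_iff.mp h)
    have hmpos : 0 < line_text.toList.length := List.length_pos_iff.mpr hn0
    set m := line_text.toList.length with hm
    have hnlen : PySem.Str.len line_text = (m : Int) := rfl
    set spans := highlight_terms.flatMap (fun spec => selectedSpansB line_text spec) with hspans
    set f : Int → Bool := fun i => spans.any (fun p => decide (p.1 ≤ i) && decide (i < p.2)) with hf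
    have hcovf : ∀ i : Int, f i = true ↔ coveredBy spans i := by
      intro i
      simp [hf, coveredBy, List.any_eq_true]
    have hbounds : ∀ p ∈ spans, SpanBounds (m : Int) p := by
      intro p hp
      have := spans_bounds line_text highlight_terms p hp
      rwa [hnlen] at this
    -- B's result is the flushed scan state
    have henum : PySem.List.enumerate ((PySem.List.pyRange 0 (m : Int)).map f)
        = (PySem.List.pyRange 0 (m : Int)).map (fun j => (j, f j)) := by
      rw [PySem.List.enumerate_eq_map_pyRange _ false]
      have hlen : PySem.List.len ((PySem.List.pyRange 0 (m : Int)).map f) = (m : Int) := by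
        simp [PySem.List.len, PySem.List.length_pyRange_one]
      rw [hlen]
      apply List.map_congr_left
      intro j hj
      rw [PySem.List.mem_pyRange_one] at hj
      rw [PySem.List.pyGetD_map_pyRange_of_nonneg f (m : Int) j false hj.1 hj.2]
    have hBval : find_highlight_spans_py_alt line_text highlight_terms
        = flushSt (((PySem.List.pyRange 0 (m : Int)).map (fun j => (j, f j))).foldl scanStepB (none, [])) (m : Int) := by
      rw [find_highlight_spans_py_alt]
      simp only [hnlen, ← hspans, ← hf]
      rw [if_neg (by omega), henum]
      rcases hr1 : (((PySem.List.pyRange 0 (m : Int)).map (fun j => (j, f j))).foldl scanStepB (none, [])).1 with - | a <;>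
        simp only [flushSt, hr1, List.append_nil]
    have hBruns := scan_isruns f m
    -- A's collected matches are exactly B's spans
    have hAms : highlight_terms.foldl (collectStepA line_text) [] = spans := by
      rw [collect_eq line_text hline highlight_terms []]
      simp [hspans]
    rw [find_highlight_spans_py]
    rw [if_neg hline, hAms, hBval]
    by_cases hsp : spans = []
    · rw [if_pos hsp]
      refine runs_unique (m : Int) [] f _ ⟨List.Pairwise.nil, by simp, ?_⟩ hBruns
      intro i hi0 hin
      rw [hcovf i, hsp]
    · rw [if_neg hsp]
      have hperm : (PySem.List.sorted spans (fun p => toLex p) false).Perm spans :=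
        PySem.List.sorted_perm spans (fun p => toLex p) false
      have hsspw : (PySem.List.sorted spans (fun p => toLex p) false).Pairwise (fun p q => p.1 ≤ q.1) := by
        refine (PySem.List.sorted_pairwise spans (fun p => toLex p)).imp ?_
        intro a b hab
        rcases Prod.Lex.le_iff.mp hab with h | ⟨h, -⟩
        · exact le_of_lt h
        · exact le_of_eq h
      have hssbd : ∀ r ∈ PySem.List.sorted spans (fun p => toLex p) false, SpanBounds (m : Int) r :=
        fun r hr => hbounds r (hperm.mem_iff.mp hr)
      have hminv := merge_inv (m : Int) (PySem.List.sorted spans (fun p => toLex p) false) [] []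
        hssbd hsspw (by simp)
        ⟨List.Pairwise.nil, by simp, by simp, fun i => Iff.rfl, by simp, by simp⟩
      rw [List.nil_append] at hminv
      obtain ⟨hpwA, hbdA, -, hcovA, -, -⟩ := hminv
      have hmap : ∀ l : List (Int × Int), l.map (fun p => (p.1, p.2)) = l := by
        intro l; simp
      rw [hmap]
      refine runs_unique (m : Int) _ f _ ⟨hpwA, hbdA, ?_⟩ hBruns
      intro i hi0 hin
      rw [hcovf i, hcovA i, coveredBy_perm _ _ hperm i]

-- ===== VERDICT (by name: the statement is the Claim_ definition above) =====
theorem find_highlight_spans_py_spec : Claim_equal_find_highlight_spans_py := by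
  intro line_text highlight_terms _
  unfold Spec_find_highlight_spans_py
  exact main_eq line_text highlight_terms
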